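-- pv_equiv track=rewrite | github.com/JulioRios00/ReconciliationManager | src/services/ccs_file_readers_service.py | group_data_by_class
-- ===== SOURCE A (Python) =====
-- from collections import defaultdict
--
-- def group_data_by_class(data):
--     grouped_data = defaultdict(list)
--
--     for item in data:
--         class_name = item.get("class")
--         if (
--             not class_name or
--             "facility" not in item
--             or item["facility"] == "Facility"
--         ):
--             continue
--
--         item_copy = item.copy()
--         item_copy.pop("class")
--         grouped_data[class_name].append(item_copy)
--
--     return dict(grouped_data)
-- ===== SOURCE B (Python) =====
-- def group_data_by_class(data):
--     kept = [
--         (item["class"], {k: v for k, v in item.items() if k != "class"})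
--         for item in data
--         if item.get("class") and "facility" in item and item["facility"] != "Facility"
--     ]
--     classes = list(dict.fromkeys(cls for cls, _ in kept))
--     return {cls: [member for c, member in kept if c == cls] for cls in classes}
-- ===== Notes on version B (the rewrite author's own statement) =====
-- stated objective: alternative
-- what changed: Replaces the single-pass defaultdict-append loop by a filter-and-project comprehension followed by a per-class gather: first build the list of surviving (class, stripped-item) pairs, then list the distinct classes in first-appearance order and materialize each group by one scan over the kept pairs.
import Mathlib
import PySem

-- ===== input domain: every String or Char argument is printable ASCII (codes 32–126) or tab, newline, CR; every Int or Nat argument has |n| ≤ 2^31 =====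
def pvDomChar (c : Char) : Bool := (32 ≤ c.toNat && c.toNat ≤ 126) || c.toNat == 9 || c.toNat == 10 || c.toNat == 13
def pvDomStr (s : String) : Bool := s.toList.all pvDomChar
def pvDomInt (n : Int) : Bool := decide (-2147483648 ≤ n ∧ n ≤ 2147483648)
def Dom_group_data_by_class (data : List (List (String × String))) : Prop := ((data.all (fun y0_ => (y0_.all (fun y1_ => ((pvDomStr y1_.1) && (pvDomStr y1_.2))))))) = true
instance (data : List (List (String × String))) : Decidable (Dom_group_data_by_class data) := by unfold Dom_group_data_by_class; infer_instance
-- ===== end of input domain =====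

-- B replaces A's single-pass defaultdict-append loop by filter-and-project then a per-class gather scan (alternative decomposition, same results).


-- ===== PORT A =====
def group_data_by_class (data : List (List (String × String))) : List (String × List (List (String × String))) :=
  (data.foldl (fun (grouped : PySem.Dict String (List (List (String × String)))) item =>
    let d := PySem.Dict.ofList item
    match d.get? "class" with
    | none => grouped
    | some class_name =>
      if class_name = "" then grouped
      else if !(d.contains "facility") then grouped
      else if d.getD "facility" "" = "Facility" then grouped
      else
        let item_copy := (d.erase "class").items
        grouped.modify class_name [] (fun l => l ++ [item_copy])
  ) PySem.Dict.empty).items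

-- ===== PORT B =====
def gdbcKeep (item : List (String × String)) : Bool :=
  let d := PySem.Dict.ofList item
  (match d.get? "class" with | none => false | some c => c ≠ "") &&
  d.contains "facility" && d.getD "facility" "" ≠ "Facility"

def group_data_by_class_alt (data : List (List (String × String))) : List (String × List (List (String × String))) :=
  let kept := (data.filter gdbcKeep).map (fun item =>
    let d := PySem.Dict.ofList item
    (d.getD "class" "", d.items.filter (fun p => p.1 ≠ "class")))
  let classes := PySem.Set.ofList (kept.map (·.1))
  classes.map (fun cls => (cls, (kept.filter (fun p => p.1 = cls)).map (·.2)))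

-- ===== PRECONDITION & SPEC =====
def Spec_group_data_by_class (data : List (List (String × String))) (out : List (String × List (List (String × String)))) : Prop := out = group_data_by_class_alt data
instance (data : List (List (String × String))) (out : List (String × List (List (String × String)))) : Decidable (Spec_group_data_by_class data out) := by unfold Spec_group_data_by_class; infer_instance

-- ===== CLAIM (what is proved, stated in full; the proofs are below) =====
def Claim_equal_group_data_by_class : Prop := ∀ (data : List (List (String × String))), Dom_group_data_by_class data → Spec_group_data_by_class data (group_data_by_class data)

-- ===== LEMMAS AND PROOFS =====

-- the kept (class, stripped item) pairs, as B builds them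
def gdbcKept (data : List (List (String × String))) : List (String × List (String × String)) :=
  (data.filter gdbcKeep).map (fun item =>
    let d := PySem.Dict.ofList item
    (d.getD "class" "", d.items.filter (fun p => p.1 ≠ "class")))

-- A's loop over data equals the unconditional modify-append loop over the kept pairs
theorem gdbc_fold_eq (data : List (List (String × String)))
    (g : PySem.Dict String (List (List (String × String)))) :
    data.foldl (fun grouped item =>
      let d := PySem.Dict.ofList item
      match d.get? "class" with
      | none => grouped
      | some class_name =>
        if class_name = "" then grouped
        else if !(d.contains "facility") then grouped
        else if d.getD "facility" "" = "Facility" then grouped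
        else grouped.modify class_name [] (fun l => l ++ [(d.erase "class").items])) g
    = (gdbcKept data).foldl (fun d p => d.modify p.1 [] (fun l => l ++ [p.2])) g := by
  induction data generalizing g with
  | nil => rfl
  | cons item rest ih =>
    simp only [List.foldl_cons, gdbcKept, List.filter_cons]
    by_cases hk : gdbcKeep item = true
    · obtain ⟨c, hc, hcne, h2, h3⟩ :
        ∃ c, (PySem.Dict.ofList item).get? "class" = some c ∧ c ≠ "" ∧
          (PySem.Dict.ofList item).contains "facility" = true ∧
          (PySem.Dict.ofList item).getD "facility" "" ≠ "Facility" := by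
        unfold gdbcKeep at hk
        cases h : (PySem.Dict.ofList item).get? "class" with
        | none => simp [h] at hk
        | some c =>
          refine ⟨c, rfl, ?_⟩
          simp only [h] at hk
          simpa [and_assoc] using hk
      have hgetD : (PySem.Dict.ofList item).getD "class" "" = c := by
        simp [PySem.Dict.getD, hc]
      simp only [hk, if_true, List.map_cons, List.foldl_cons, hc, hcne, h2, h3,
        Bool.not_true, Bool.false_eq_true, if_false]
      rw [ih]
      have hf : (fun p : String × String => !(p.1 == "class")) = (fun p => !decide (p.1 = "class")) := by
        funext p; by_cases h : p.1 = "class" <;> simp [h]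
      simp [gdbcKept, hgetD, PySem.Dict.erase, hf]
    · have hk' : gdbcKeep item = false := by simpa using hk
      have hstep : (match (PySem.Dict.ofList item).get? "class" with
        | none => g
        | some class_name =>
          if class_name = "" then g
          else if !((PySem.Dict.ofList item).contains "facility") then g
          else if (PySem.Dict.ofList item).getD "facility" "" = "Facility" then g
          else g.modify class_name [] (fun l => l ++ [((PySem.Dict.ofList item).erase "class").items])) = g := by
        unfold gdbcKeep at hk'
        cases h : (PySem.Dict.ofList item).get? "class" with
        | none => simp
        | some c =>
          simp only [h, Bool.and_eq_false_iff] at hk'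
          by_cases hce : c = ""
          · simp [hce]
          · rcases hk' with hk' | h3
            · rcases hk' with hke | h2
              · exact absurd (by simpa using hke) hce
              · simp [hce, h2]
            · simp only [ne_eq, decide_not, Bool.not_eq_false', decide_eq_true_eq] at h3
              simp [hce, h3]
      rw [hstep]
      simpa [gdbcKept, hk'] using ih g

theorem gdbc_items (l : List (String × List (String × String))) :
    (l.foldl (fun d p => d.modify p.1 [] (fun v => v ++ [p.2]))
        (PySem.Dict.empty : PySem.Dict String (List (List (String × String))))).items
    = (PySem.Set.ofList (l.map (·.1))).map
        (fun cls => (cls, (l.filter (fun p => decide (p.1 = cls))).map (·.2))) := by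
  have hkeys : (l.foldl (fun d p => d.modify p.1 [] (fun v => v ++ [p.2]))
      (PySem.Dict.empty : PySem.Dict String (List (List (String × String))))).keys
      = PySem.Set.ofList (l.map (·.1)) := by
    rw [PySem.Dict.keys_foldl_modify_key]
    simp [PySem.Set.update_nil_left]
  have hnd : (l.foldl (fun d p => d.modify p.1 [] (fun v => v ++ [p.2]))
      (PySem.Dict.empty : PySem.Dict String (List (List (String × String))))).keys.Nodup := by
    rw [hkeys]; exact PySem.Set.nodup_ofList _
  rw [PySem.Dict.items_eq_map_keys _ hnd [], hkeys]
  refine List.map_congr_left ?_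
  intro cls _
  rw [PySem.Dict.getD_foldl_modify_append]
  have hf : (fun p : String × List (String × String) => p.1 == cls)
      = (fun p => decide (p.1 = cls)) := by
    funext p; by_cases h : p.1 = cls <;> simp [h]
  simp [hf]

-- ===== VERDICT (by name: the statement is the Claim_ definition above) =====
theorem group_data_by_class_spec : Claim_equal_group_data_by_class := by
  intro data _
  show group_data_by_class data = group_data_by_class_alt data
  unfold group_data_by_class group_data_by_class_alt
  rw [gdbc_fold_eq]
  have h := gdbc_items (gdbcKept data)
  rw [h]
  simp only [gdbcKept]
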